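-- pv_equiv track=rewrite | github.com/jacksonfellows/euler | python/109_Darts.py | checkouts_
-- ===== SOURCE A (Python) =====
-- singles = [*range(1,21), 25]
--
-- doubles = [*range(1,21), 25]
--
-- triples = [*range(1,21)]
--
-- def checkouts_(score, n):
--     if score == 0:
--         return [()]
--     if n == 3:
--         return []
--     res = []
--     for x in singles:
--         if x > score: break
--         res += [(*r,f's{x}') for r in checkouts_(score - x, n+1)]
--     for x in doubles:
--         if 2*x > score: break
--         res += [(*r,f'd{x}') for r in checkouts_(score - 2*x, n+1)]
--     for x in triples:
--         if 3*x > score: break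
--         res += [(*r,f't{x}') for r in checkouts_(score - 3*x, n+1)]
--     return res
-- ===== SOURCE B (Python) =====
-- singles = [*range(1,21), 25]
--
-- doubles = [*range(1,21), 25]
--
-- triples = [*range(1,21)]
--
-- _throws = [(x, f's{x}') for x in singles] + \
--           [(2*x, f'd{x}') for x in doubles] + \
--           [(3*x, f't{x}') for x in triples]
--
-- def checkouts_(score, n):
--     memo = {}
--     def go(s, k):
--         if s == 0:
--             return [()]
--         if k == 3:
--             return []
--         key = (s, k)
--         if key in memo:
--             return memo[key]
--         res = [(*r, lab) for (v, lab) in _throws if v <= s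
--                for r in go(s - v, k + 1)]
--         memo[key] = res
--         return res
--     return go(score, n)
-- ===== Notes on version B (the rewrite author's own statement) =====
-- stated objective: faster
-- what changed: B replaces A's three separate break-terminated category loops by one precomputed flat (value,label) throw table filtered per call, and memoizes the recursion on (score, darts-thrown) in a dict, turning the naive recursion with overlapping subproblems into top-down DP with shared subresults.
import Mathlib
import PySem

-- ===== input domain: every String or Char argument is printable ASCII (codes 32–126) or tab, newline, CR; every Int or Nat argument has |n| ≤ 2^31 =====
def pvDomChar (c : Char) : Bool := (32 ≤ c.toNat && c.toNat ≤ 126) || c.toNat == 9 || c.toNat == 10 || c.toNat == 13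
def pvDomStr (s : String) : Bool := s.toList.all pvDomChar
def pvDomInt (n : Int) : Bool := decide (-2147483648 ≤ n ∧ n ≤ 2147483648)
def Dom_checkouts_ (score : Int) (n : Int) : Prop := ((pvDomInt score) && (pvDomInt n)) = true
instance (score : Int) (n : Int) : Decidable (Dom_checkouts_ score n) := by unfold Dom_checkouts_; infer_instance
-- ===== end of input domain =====

-- B precomputes one flat (value, label) throw table and memoizes the recursion on (score, n)
-- in a dict (top-down DP), intended to avoid A's recomputation of overlapping subproblems.

-- ===== PORT A =====
def pySingles : List Int := [1,2,3,4,5,6,7,8,9,10,11,12,13,14,15,16,17,18,19,20,25]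
def pyDoubles : List Int := [1,2,3,4,5,6,7,8,9,10,11,12,13,14,15,16,17,18,19,20,25]
def pyTriples : List Int := [1,2,3,4,5,6,7,8,9,10,11,12,13,14,15,16,17,18,19,20]

-- one of A's 'for x in xs: if m*x > score: break; res += [(*r, f'<tag>{x}') …]' loops (m = 1/2/3)
def chkLoop (recur : Int → List (List String)) (score : Int) (m : Int) (tag : String) :
    List Int → List (List String) → List (List String)
  | [], res => res
  | x :: rest, res =>
    if m * x > score then res
    else chkLoop recur score m tag rest
      (res ++ (recur (score - m * x)).map (fun r => r ++ [tag ++ PySem.Int.toStr x]))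

-- A's recursion; fuel score.toNat + 1 always suffices (every recursive call strictly
-- decreases a nonnegative score), the fuel-0 branch is unreachable from checkouts_.
def chkA : Nat → Int → Int → List (List String)
  | 0, _, _ => []
  | fuel + 1, score, n =>
    if score = 0 then [[]]
    else if n = 3 then []
    else
      let res := chkLoop (fun s => chkA fuel s (n + 1)) score 1 "s" pySingles []
      let res := chkLoop (fun s => chkA fuel s (n + 1)) score 2 "d" pyDoubles res
      chkLoop (fun s => chkA fuel s (n + 1)) score 3 "t" pyTriples res

def checkouts_ (score : Int) (n : Int) : List (List String) :=
  chkA (score.toNat + 1) score n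

-- ===== PORT B =====
-- B's flat throw table: _throws in Source B
def pyThrows : List (Int × String) :=
  pySingles.map (fun x => (x, "s" ++ PySem.Int.toStr x))
    ++ pyDoubles.map (fun x => (2 * x, "d" ++ PySem.Int.toStr x))
    ++ pyTriples.map (fun x => (3 * x, "t" ++ PySem.Int.toStr x))

-- Source B's inner 'go' with the memo dict threaded through; same sufficient fuel as A's port
def chkB : Nat → PySem.Dict (Int × Int) (List (List String)) → Int → Int →
    List (List String) × PySem.Dict (Int × Int) (List (List String))
  | 0, memo, _, _ => ([], memo)
  | fuel + 1, memo, s, k =>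
    if s = 0 then ([[]], memo)
    else if k = 3 then ([], memo)
    else
      match memo.get? (s, k) with
      | some v => (v, memo)
      | none =>
        let st := pyThrows.foldl
          (fun acc vl =>
            if vl.1 ≤ s then
              let sub := chkB fuel acc.2 (s - vl.1) (k + 1)
              (acc.1 ++ sub.1.map (fun r => r ++ [vl.2]), sub.2)
            else acc) (([] : List (List String)), memo)
        (st.1, st.2.insert (s, k) st.1)

def checkouts__alt (score : Int) (n : Int) : List (List String) :=
  (chkB (score.toNat + 1) PySem.Dict.empty score n).1

-- ===== PRECONDITION & SPEC =====
-- Pre_ excludes inputs with n outside 0..3 combined with score > 2000: there A's recursion depth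
-- min(score, 3-n) (unbounded for n > 3) can exceed the interpreter's recursion limit
-- (RecursionError), or the enumeration is astronomically large; on the cheap part of that region
-- A returns (e.g. [] when the score is unreachable) and B returns the same value.
def Pre_checkouts_ (score : Int) (n : Int) : Prop := (0 ≤ n ∧ n ≤ 3) ∨ score ≤ 2000
instance (score : Int) (n : Int) : Decidable (Pre_checkouts_ score n) := by unfold Pre_checkouts_; infer_instance
def pvWitness_checkouts_ : Int × Int := (6, 1)

def Spec_checkouts_ (score : Int) (n : Int) (out : List (List String)) : Prop := out = checkouts__alt score n
instance (score : Int) (n : Int) (out : List (List String)) : Decidable (Spec_checkouts_ score n out) := by unfold Spec_checkouts_; infer_instance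

-- ===== CLAIM (what is proved, stated in full; the proofs are below) =====
def Claim_equal_checkouts_ : Prop := ∀ (score : Int) (n : Int), Dom_checkouts_ score n → Pre_checkouts_ score n → Spec_checkouts_ score n (checkouts_ score n)

-- ===== LEMMAS AND PROOFS =====

-- B's recursion without the memo: the common reference both ports are reduced to
def plainB : Nat → Int → Int → List (List String)
  | 0, _, _ => []
  | fuel + 1, s, k =>
    if s = 0 then [[]]
    else if k = 3 then []
    else pyThrows.foldl
      (fun acc vl =>
        if vl.1 ≤ s then acc ++ (plainB fuel (s - vl.1) (k + 1)).map (fun r => r ++ [vl.2])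
        else acc) []

theorem throws_pos : ∀ p ∈ pyThrows, (1 : Int) ≤ p.1 := by decide

-- plainB does not depend on the fuel once the fuel exceeds score.toNat
theorem plain_fuel : ∀ (f g : Nat) (s k : Int), s.toNat < f → s.toNat < g →
    plainB f s k = plainB g s k := by
  intro f
  induction f with
  | zero => intro g s k hf _; omega
  | succ f ih =>
    intro g s k hf hg
    obtain ⟨g', rfl⟩ : ∃ g', g = g' + 1 := ⟨g - 1, by omega⟩
    by_cases hs : s = 0
    · simp [plainB, hs]
    · by_cases hk : k = 3
      · simp [plainB, hs, hk]
      · simp only [plainB, if_neg hs, if_neg hk]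
        apply PySem.List.foldl_congr_mem
        intro acc vl hvl
        by_cases hv : vl.1 ≤ s
        · have h1 : (1 : Int) ≤ vl.1 := throws_pos vl hvl
          rw [if_pos hv, if_pos hv, ih g' (s - vl.1) (k + 1) (by omega) (by omega)]
        · rw [if_neg hv, if_neg hv]

-- a break-loop over a ≤-sorted list where the guard already fails does nothing
theorem foldl_skip {α : Type} (p : α → Prop) [DecidablePred p]
    (f : List (List String) → α → List (List String)) :
    ∀ (l : List α) (acc : List (List String)), (∀ x ∈ l, ¬ p x) →
      l.foldl (fun acc x => if p x then f acc x else acc) acc = acc := by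
  intro l
  induction l with
  | nil => intro acc _; rfl
  | cons x rest ih =>
    intro acc h
    simp only [List.foldl_cons, if_neg (h x (List.mem_cons_self))]
    exact ih acc (fun y hy => h y (List.mem_cons_of_mem x hy))

-- A's break-terminated loop equals the filtered fold, for a ≤-sorted list of values
theorem chkLoop_eq (recur : Int → List (List String)) (score m : Int) (tag : String)
    (hm : 0 < m) :
    ∀ (xs : List Int), xs.Pairwise (· ≤ ·) → ∀ (res : List (List String)),
      chkLoop recur score m tag xs res =
        xs.foldl (fun acc x =>
          if m * x ≤ score then
            acc ++ (recur (score - m * x)).map (fun r => r ++ [tag ++ PySem.Int.toStr x])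
          else acc) res := by
  intro xs
  induction xs with
  | nil => intro _ res; rfl
  | cons x rest ih =>
    intro hpw res
    rw [List.pairwise_cons] at hpw
    by_cases h : m * x > score
    · rw [chkLoop, if_pos h, List.foldl_cons, if_neg (by omega)]
      rw [foldl_skip (fun y => m * y ≤ score) _ rest res]
      intro y hy
      have : x ≤ y := hpw.1 y hy
      have : m * x ≤ m * y := by
        exact mul_le_mul_of_nonneg_left this (le_of_lt hm)
      omega
    · rw [chkLoop, if_neg h, List.foldl_cons, if_pos (by omega)]
      exact ih hpw.2 _

-- A's port computes plainB at every fuel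
theorem chkA_eq_plain : ∀ (f : Nat) (s k : Int), chkA f s k = plainB f s k := by
  intro f
  induction f with
  | zero => intro s k; rfl
  | succ f ih =>
    intro s k
    by_cases hs : s = 0
    · simp [chkA, plainB, hs]
    · by_cases hk : k = 3
      · simp [chkA, plainB, hs, hk]
      · have hrec : (fun s' => chkA f s' (k + 1)) = (fun s' => plainB f s' (k + 1)) := by
          funext s'; exact ih s' (k + 1)
        simp only [chkA, plainB, if_neg hs, if_neg hk, pyThrows,
          List.foldl_append, List.foldl_map, hrec]
        rw [chkLoop_eq _ s 1 "s" (by norm_num) pySingles (by decide),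
          chkLoop_eq _ s 2 "d" (by norm_num) pyDoubles (by decide),
          chkLoop_eq _ s 3 "t" (by norm_num) pyTriples (by decide)]
        simp only [one_mul]

-- memo invariant: every cached value is the true (fuel-independent) value of its key
def GoodMemo (memo : PySem.Dict (Int × Int) (List (List String))) : Prop :=
  ∀ (s k : Int) (v : List (List String)),
    memo.get? (s, k) = some v → v = plainB (s.toNat + 1) s k

theorem fold_inv (f : Nat) (s k : Int) (hf : s.toNat < f + 1)
    (hIH : ∀ memo (s' k' : Int), GoodMemo memo → s'.toNat < f →
      (chkB f memo s' k').1 = plainB (s'.toNat + 1) s' k' ∧ GoodMemo (chkB f memo s' k').2) :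
    ∀ (ts : List (Int × String)), (∀ p ∈ ts, (1 : Int) ≤ p.1) →
      ∀ (acc : List (List String)) (memo : PySem.Dict (Int × Int) (List (List String))),
        GoodMemo memo →
        (ts.foldl (fun acc vl =>
            if vl.1 ≤ s then
              let sub := chkB f acc.2 (s - vl.1) (k + 1)
              (acc.1 ++ sub.1.map (fun r => r ++ [vl.2]), sub.2)
            else acc) (acc, memo)).1 =
          ts.foldl (fun acc vl =>
            if vl.1 ≤ s then
              acc ++ (plainB ((s - vl.1).toNat + 1) (s - vl.1) (k + 1)).map (fun r => r ++ [vl.2])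
            else acc) acc ∧
        GoodMemo (ts.foldl (fun acc vl =>
            if vl.1 ≤ s then
              let sub := chkB f acc.2 (s - vl.1) (k + 1)
              (acc.1 ++ sub.1.map (fun r => r ++ [vl.2]), sub.2)
            else acc) (acc, memo)).2 := by
  intro ts
  induction ts with
  | nil => intro _ acc memo hmemo; exact ⟨rfl, hmemo⟩
  | cons vl rest ihts =>
    intro hpos acc memo hmemo
    by_cases hv : vl.1 ≤ s
    · have h1 : (1 : Int) ≤ vl.1 := hpos vl (List.mem_cons_self)
      have hlt : (s - vl.1).toNat < f := by omega
      obtain ⟨hval, hgood⟩ := hIH memo (s - vl.1) (k + 1) hmemo hlt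
      simp only [List.foldl_cons, if_pos hv]
      rw [hval] at *
      exact ihts (fun p hp => hpos p (List.mem_cons_of_mem vl hp)) _ _ hgood
    · simp only [List.foldl_cons, if_neg hv]
      exact ihts (fun p hp => hpos p (List.mem_cons_of_mem vl hp)) acc memo hmemo

theorem chkB_spec : ∀ (f : Nat) (memo : PySem.Dict (Int × Int) (List (List String)))
    (s k : Int), GoodMemo memo → s.toNat < f →
    (chkB f memo s k).1 = plainB (s.toNat + 1) s k ∧ GoodMemo (chkB f memo s k).2 := by
  intro f
  induction f with
  | zero => intro memo s k _ h; omega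
  | succ f ih =>
    intro memo s k hmemo hf
    by_cases hs : s = 0
    · subst hs
      constructor
      · simp [chkB, plainB]
      · simpa [chkB] using hmemo
    · by_cases hk : k = 3
      · subst hk
        constructor
        · simp [chkB, plainB, hs]
        · simpa [chkB, hs] using hmemo
      · cases hm : memo.get? (s, k) with
        | some v =>
          constructor
          · simp only [chkB, if_neg hs, if_neg hk, hm]
            exact hmemo s k v hm
          · simpa [chkB, if_neg hs, if_neg hk, hm] using hmemo
        | none =>
          obtain ⟨hval, hgood⟩ := fold_inv f s k hf ih pyThrows throws_pos [] memo hmemo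
          have hplain : plainB (s.toNat + 1) s k =
              pyThrows.foldl (fun acc vl =>
                if vl.1 ≤ s then
                  acc ++ (plainB ((s - vl.1).toNat + 1) (s - vl.1) (k + 1)).map
                    (fun r => r ++ [vl.2])
                else acc) [] := by
            simp only [plainB, if_neg hs, if_neg hk]
            apply PySem.List.foldl_congr_mem
            intro acc vl hvl
            by_cases hv : vl.1 ≤ s
            · have h1 : (1 : Int) ≤ vl.1 := throws_pos vl hvl
              rw [if_pos hv, if_pos hv,
                plain_fuel s.toNat ((s - vl.1).toNat + 1) (s - vl.1) (k + 1) (by omega) (by omega)]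
              simp only [plainB]
            · rw [if_neg hv, if_neg hv]
          simp only [chkB, if_neg hs, if_neg hk, hm]
          constructor
          · rw [hval, hplain]
          · intro s' k' v hv
            rw [PySem.Dict.get?_insert] at hv
            by_cases heq : ((s' : Int), (k' : Int)) = (s, k)
            · rw [if_pos heq] at hv
              have h1 : s' = s := congrArg Prod.fst heq
              have h2 : k' = k := congrArg Prod.snd heq
              subst h1; subst h2
              cases hv
              rw [hval, hplain]
            · rw [if_neg heq] at hv
              exact hgood s' k' v hv

-- ===== VERDICT (by name: the statement is the Claim_ definition above) =====
theorem checkouts__spec : Claim_equal_checkouts_ := by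
  intro score n _ _
  unfold Spec_checkouts_ checkouts_ checkouts__alt
  have hempty : GoodMemo PySem.Dict.empty := by
    intro s k v h
    simp [PySem.Dict.get?_empty] at h
  obtain ⟨hB, _⟩ := chkB_spec (score.toNat + 1) PySem.Dict.empty score n hempty (by omega)
  rw [hB, chkA_eq_plain]
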